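-- pv_equiv track=rewrite | github.com/Hankanman/Home-Assistant | custom_components/osrm_travel_time/sensor.py | _get_route_from_steps
-- ===== SOURCE A (Python) =====
-- from typing import Callable, Dict, Optional, Union, List
--
-- def _get_route_from_steps(steps: List[dict]) -> str:
--     """Extract a route from the maneuver instructions."""
--     road_names: List[str] = []
--
--     for step in steps:
--         road_name = step["name"]
--
--         if road_name != "-":
--             # Only add if it does not repeat
--             if not road_names or road_names[-1] != road_name:
--                 road_names.append(road_name)
--     route = "; ".join(list(map(str, road_names)))
--     return route
-- ===== SOURCE B (Python) =====
-- from typing import List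
--
-- def _get_route_from_steps(steps: List[dict]) -> str:
--     """Extract a route from the maneuver instructions."""
--     names = [step["name"] for step in steps if step["name"] != "-"]
--
--     def dedup(lo: int, hi: int) -> List[str]:
--         # divide and conquer: dedup each half, drop the duplicate at the seam
--         if hi - lo <= 1:
--             return names[lo:hi]
--         mid = (lo + hi) // 2
--         left = dedup(lo, mid)
--         right = dedup(mid, hi)
--         if left[-1] == right[0]:
--             right = right[1:]
--         return left + right
--
--     return "; ".join(map(str, dedup(0, len(names))))
-- ===== Notes on version B (the rewrite author's own statement) =====
-- stated objective: alternative
-- what changed: Replaces A's single left-to-right pass with a last-element accumulator by a divide-and-conquer recursion: filter the '-' names, recursively dedup each half of the list, and merge halves by dropping the right half's head when it equals the left half's last element.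
import Mathlib
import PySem

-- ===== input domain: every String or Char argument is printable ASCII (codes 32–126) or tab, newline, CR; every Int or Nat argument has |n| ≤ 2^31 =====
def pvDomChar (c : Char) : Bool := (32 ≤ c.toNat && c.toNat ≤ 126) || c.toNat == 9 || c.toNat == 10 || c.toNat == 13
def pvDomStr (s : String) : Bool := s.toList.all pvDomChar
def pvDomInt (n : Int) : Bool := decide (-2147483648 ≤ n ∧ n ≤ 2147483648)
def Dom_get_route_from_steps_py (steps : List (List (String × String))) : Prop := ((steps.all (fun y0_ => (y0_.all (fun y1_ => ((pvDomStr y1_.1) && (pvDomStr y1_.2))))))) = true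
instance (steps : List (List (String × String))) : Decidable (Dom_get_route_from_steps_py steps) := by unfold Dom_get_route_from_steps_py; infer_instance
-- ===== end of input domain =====

-- B replaces A's single-pass last-element accumulator by a divide-and-conquer recursion
-- (dedup each half of the filtered names, drop the duplicate at the seam); same result.
-- ===== PORT A =====
-- step["name"] via PySem.Dict.get?; Pre_ excludes steps lacking the "name" key (Python KeyError).
def pvStepName (step : List (String × String)) : String :=
  ((PySem.Dict.mk step).get? "name").getD ""

def get_route_from_steps_py (steps : List (List (String × String))) : String :=
  let road_names := steps.foldl (fun road_names step =>
    let road_name := pvStepName step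
    if road_name != "-" then
      if road_names = [] ∨ road_names.getLast? != some road_name then
        road_names ++ [road_name]
      else road_names
    else road_names) []
  PySem.Str.join "; " road_names

-- ===== PORT B =====
-- Source B's dedup(lo, hi) works on the slice names[lo:hi]; here the slice is the list itself,
-- mid - lo = (hi - lo) // 2 becomes k = l.length / 2, names[lo:mid]/names[mid:hi] = take k / drop k,
-- left[-1] == right[0] is compared via getLast?/head? (both halves are nonempty there in Python).
def pvDedupDC (l : List String) : List String :=
  if l.length ≤ 1 then l
  else
    let k := l.length / 2
    let left := pvDedupDC (l.take k)
    let right := pvDedupDC (l.drop k)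
    if left.getLast? = right.head? then left ++ right.tail else left ++ right
termination_by l.length
decreasing_by
  · simp; omega
  · simp; omega

def get_route_from_steps_py_alt (steps : List (List (String × String))) : String :=
  let names := (steps.map pvStepName).filter (fun n => n != "-")
  PySem.Str.join "; " (pvDedupDC names)

-- ===== PRECONDITION & SPEC =====
-- Pre_ excludes inputs where some step has no "name" key: both Pythons raise KeyError there.
def Pre_get_route_from_steps_py (steps : List (List (String × String))) : Prop :=
  ∀ step ∈ steps, ((PySem.Dict.mk step).get? "name").isSome
instance (steps : List (List (String × String))) : Decidable (Pre_get_route_from_steps_py steps) := by unfold Pre_get_route_from_steps_py; infer_instance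
def pvWitness_get_route_from_steps_py : (List (List (String × String))) :=
  [[("name", "A")], [("name", "-")], [("name", "A")], [("name", "B")]]
def Spec_get_route_from_steps_py (steps : List (List (String × String))) (out : String) : Prop := out = get_route_from_steps_py_alt steps
instance (steps : List (List (String × String))) (out : String) : Decidable (Spec_get_route_from_steps_py steps out) := by unfold Spec_get_route_from_steps_py; infer_instance

-- ===== CLAIM (what is proved, stated in full; the proofs are below) =====
def Claim_equal_get_route_from_steps_py : Prop := ∀ (steps : List (List (String × String))), Dom_get_route_from_steps_py steps → Pre_get_route_from_steps_py steps → Spec_get_route_from_steps_py steps (get_route_from_steps_py steps)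

-- ===== LEMMAS AND PROOFS =====

-- g: what A's loop appends after a state whose last element is `last`
def pvG : Option String → List String → List String
  | _, [] => []
  | last, x :: xs =>
    if x = "-" then pvG last xs
    else if some x = last then pvG last xs
    else x :: pvG (some x) xs

lemma pvFoldl_eq_pvG (l : List String) : ∀ (acc : List String),
    l.foldl (fun road_names road_name =>
      if road_name != "-" then
        if road_names = [] ∨ road_names.getLast? != some road_name then
          road_names ++ [road_name]
        else road_names
      else road_names) acc = acc ++ pvG acc.getLast? l := by
  induction l with
  | nil => intro acc; simp [pvG]
  | cons x xs ih =>
    intro acc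
    rw [List.foldl_cons, ih]
    by_cases hx : x = "-"
    · simp [hx, pvG]
    · by_cases hlast : some x = acc.getLast?
      · have hne : acc ≠ [] := by
          intro h; rw [h] at hlast; simp at hlast
        have hc : ¬ (acc = [] ∨ (acc.getLast? != some x) = true) := by
          simp only [bne_iff_ne, ne_eq, not_or, Decidable.not_not]
          exact ⟨hne, hlast.symm⟩
        rw [if_pos (by simp [hx]), if_neg hc]
        simp [pvG, hx, ← hlast]
      · have hcond : (acc = [] ∨ (acc.getLast? != some x) = true) := by
          by_cases hacc : acc = []
          · exact Or.inl hacc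
          · right; simp; exact fun h => hlast (Eq.symm h)
        rw [if_pos (by simp [hx]), if_pos hcond]
        simp [pvG, hx, hlast]

-- h: pvG after filtering out "-"
def pvH : Option String → List String → List String
  | _, [] => []
  | last, x :: xs => if some x = last then pvH last xs else x :: pvH (some x) xs

lemma pvG_eq_pvH (l : List String) : ∀ last,
    pvG last l = pvH last (l.filter (fun n => n != "-")) := by
  induction l with
  | nil => intro last; simp [pvG, pvH]
  | cons x xs ih =>
    intro last
    by_cases hx : x = "-"
    · simp [pvG, hx, ih]
    · simp [pvG, hx, pvH, ih]

-- splitting pvH at an append: the threaded state after xs is xs.getLast?.or last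
lemma pvH_append (xs ys : List String) : ∀ (last : Option String),
    pvH last (xs ++ ys) = pvH last xs ++ pvH (xs.getLast?.or last) ys := by
  induction xs with
  | nil => intro last; simp [pvH]
  | cons x xs ih =>
    intro last
    have hstate : (x :: xs).getLast?.or last = xs.getLast?.or (some x) := by
      cases xs with
      | nil => simp
      | cons y t =>
        obtain ⟨a, ha⟩ := Option.isSome_iff_exists.mp (List.getLast?_isSome.mpr (List.cons_ne_nil y t))
        simp [List.getLast?_cons_cons, ha]
    by_cases hx : some x = last
    · subst hx
      simp [pvH, ih, hstate]
    · simp [pvH, hx, ih, hstate]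

-- restarting pvH from `some a` versus from `none`
lemma pvH_some (a : String) (ys : List String) :
    pvH (some a) ys = if ys.head? = some a then (pvH none ys).tail else pvH none ys := by
  cases ys with
  | nil => simp [pvH]
  | cons y ys' =>
    by_cases hy : y = a
    · simp [pvH, hy]
    · simp [pvH, hy]

lemma pvH_head (l : List String) : (pvH none l).head? = l.head? := by
  cases l <;> simp [pvH]

lemma pvH_cons_getLast (xs : List String) : ∀ a,
    (a :: pvH (some a) xs).getLast? = (a :: xs).getLast? := by
  induction xs with
  | nil => intro a; simp [pvH]
  | cons y ys ih =>
    intro a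
    by_cases hy : y = a
    · subst hy
      have h1 : pvH (some y) (y :: ys) = pvH (some y) ys := by simp [pvH]
      rw [h1, ih y]
      simp [List.getLast?_cons_cons]
    · have h1 : pvH (some a) (y :: ys) = y :: pvH (some y) ys := by simp [pvH, hy]
      rw [h1]
      simp only [List.getLast?_cons_cons]
      exact ih y

lemma pvH_getLast (l : List String) (hl : l ≠ []) :
    (pvH none l).getLast? = l.getLast? := by
  cases l with
  | nil => exact absurd rfl hl
  | cons x xs => simpa [pvH] using pvH_cons_getLast xs x

-- splitting the linear dedup at an arbitrary cut point 1 ≤ k < length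
lemma pvSplit (l : List String) (k : ℕ) (hk1 : 1 ≤ k) (hkl : k < l.length) :
    pvH none l = if (pvH none (l.take k)).getLast? = (pvH none (l.drop k)).head?
      then pvH none (l.take k) ++ (pvH none (l.drop k)).tail
      else pvH none (l.take k) ++ pvH none (l.drop k) := by
  have htake : l.take k ≠ [] := by
    intro h
    rcases List.take_eq_nil_iff.mp h with h' | h'
    · omega
    · subst h'; simp at hkl
  obtain ⟨a, ha⟩ := Option.isSome_iff_exists.mp (List.getLast?_isSome.mpr htake)
  have hsplit : pvH none l = pvH none (l.take k) ++ pvH (some a) (l.drop k) := by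
    conv_lhs => rw [← List.take_append_drop k l]
    rw [pvH_append, ha]
    rfl
  rw [hsplit, pvH_some, pvH_getLast _ htake, ha, pvH_head]
  by_cases hc : (l.drop k).head? = some a
  · rw [if_pos hc, if_pos hc.symm]
  · rw [if_neg hc, if_neg (fun h => hc h.symm)]

-- the divide-and-conquer dedup computes the same list as the linear dedup
lemma pvDedupDC_eq (l : List String) : pvDedupDC l = pvH none l := by
  fun_induction pvDedupDC l with
  | case1 l hle =>
    match l, hle with
    | [], _ => simp [pvH]
    | [x], _ => simp [pvH]
  | case2 l hle k left right hcond ih1 ih2 =>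
    simp only [k, left, right] at hcond ⊢
    rw [ih1, ih2] at hcond ⊢
    rw [pvSplit l (l.length / 2) (by omega) (by omega), if_pos hcond]
  | case3 l hle k left right hcond ih1 ih2 =>
    simp only [k, left, right] at hcond ⊢
    rw [ih1, ih2] at hcond ⊢
    rw [pvSplit l (l.length / 2) (by omega) (by omega), if_neg hcond]

lemma pvFoldl_names (steps : List (List (String × String))) :
    steps.foldl (fun road_names step =>
      let road_name := pvStepName step
      if road_name != "-" then
        if road_names = [] ∨ road_names.getLast? != some road_name then
          road_names ++ [road_name]
        else road_names
      else road_names) [] = pvG none (steps.map pvStepName) := by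
  have := pvFoldl_eq_pvG (steps.map pvStepName) []
  rw [List.foldl_map] at this
  simpa using this

-- ===== VERDICT (by name: the statement is the Claim_ definition above) =====
theorem get_route_from_steps_py_spec : Claim_equal_get_route_from_steps_py := by
  intro steps _ _
  unfold Spec_get_route_from_steps_py get_route_from_steps_py get_route_from_steps_py_alt
  simp only [pvFoldl_names, pvG_eq_pvH, pvDedupDC_eq]
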